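-- pv_equiv track=rewrite | github.com/Jaap58428/ISCRIP | week5/Vierkant_van_Pascal.py | paden
-- ===== SOURCE A (Python) =====
-- def vierkant(size, *starting_number):
--     # wanneer er een optioneel argument aanwezig is zal deze worden toegewezen als start getal
--     if starting_number:
--         start = starting_number[0]
--     # zo niet dan is 1 het standaard getal
--     else:
--         start = 1
--
--     # initieer het raster
--     raster = [[start for x in range(size)] for y in range(size)]
--
--     # start bij elke rij en kolom op de 2e index
--     for row in range(1, size):
--         for number in range(1, size):
--             # neem voor elk raster punt het getal er boven en links van en tel deze op
--             raster[row][number] = raster[row - 1][number] + raster[row][number - 1]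
--
--     return raster
--
-- def paden(size, *start):
--     if start:
--         # wanneer er een argument aanwezig is geven we die door
--         raster = vierkant(size, start[0])
--     else:
--         raster = vierkant(size)
--
--     # zet een integer die be7paald hoe lang elke element moet zijn
--     max_string_size = len(str(raster[size - 1][size - 1])) + 1
--
--     result = ''
--
--     for row in range(size):
--         for column in range(size):
--             # bepaal het toe te voegen element
--             new_item = str(raster[row][column])
--             # zolang het element niet lang genoeg is voegen we spaties toe
--             while len(new_item) < max_string_size:
--                 new_item = ' ' + new_item
--             result += new_item
--         # aan het einde van een rij voegen we een nieuwe regel toe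
--         result += '\n'
--
--     return result
-- ===== SOURCE B (Python) =====
-- def paden(size, *start):
--     # Closed form instead of the neighbor-sum DP: cell (i, j) = start * C(i+j, i).
--     # A passed start of None means "use the default", i.e. 1.
--     s = start[0] if start and start[0] is not None else 1
--
--     def comb(n, k):
--         r = 1
--         for t in range(k):
--             r = r * (n - t) // (t + 1)
--         return r
--
--     width = len(str(s * comb(2 * size - 2, size - 1))) + 1
--     lines = []
--     for i in range(size):
--         lines.append(''.join(str(s * comb(i + j, i)).rjust(width) for j in range(size)))
--     return ''.join(line + '\n' for line in lines)
-- ===== Notes on version B (the rewrite author's own statement) =====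
-- stated objective: alternative
-- what changed: The neighbor-sum dynamic programming over a mutable size-by-size grid is replaced by the closed form cell(i,j) = start * C(i+j, i), with the binomial computed by the multiplicative formula and rows built with str.rjust and join instead of the while-loop padding and string accumulation.
-- intended difference: When start is an explicitly passed None, A fills the grid with None and, on size = 1 (the only size where it then returns, raising TypeError otherwise), prints ' None\n'; B treats None as the absent-argument default 1 and returns ' 1\n', the intended value for an optional numeric start. — e.g. on paden(1, none): A returns " None\n", B returns " 1\n"
import Mathlib
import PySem

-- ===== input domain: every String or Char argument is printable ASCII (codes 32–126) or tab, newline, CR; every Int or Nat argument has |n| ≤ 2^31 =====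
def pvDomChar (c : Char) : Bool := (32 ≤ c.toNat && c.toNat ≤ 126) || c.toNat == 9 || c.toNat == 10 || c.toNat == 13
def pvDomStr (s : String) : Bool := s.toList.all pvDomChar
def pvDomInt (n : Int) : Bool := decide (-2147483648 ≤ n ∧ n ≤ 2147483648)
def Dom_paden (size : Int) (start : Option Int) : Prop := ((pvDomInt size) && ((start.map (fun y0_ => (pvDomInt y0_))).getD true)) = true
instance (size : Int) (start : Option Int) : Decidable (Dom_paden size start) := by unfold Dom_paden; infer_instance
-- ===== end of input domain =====

-- B replaces A's neighbour-sum dynamic programming over a mutable grid by the closed form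
-- cell(i,j) = start * C(i+j, i) computed per cell; same padded text output.

-- ===== PORT A =====
-- A's grid cells are Python values that are either ints or None (when start[0] is None);
-- they are ported as Option Int with none = Python's None. Adding with None would raise
-- TypeError in Python (excluded by Pre_ below); the port returns none there.
def padenAddO : Option Int → Option Int → Option Int
  | some a, some b => some (a + b)
  | _, _ => none

-- str(x) on such a cell: ints via PySem, str(None) = "None"
def padenStr : Option Int → List Char
  | some n => PySem.Int.toChars n
  | none => ['N', 'o', 'n', 'e']

-- vierkant: builds the size×size grid by the in-place neighbour-sum recurrence.
-- startingNumber: outer none = no second argument (start = 1), some pv = the passed value pv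
-- (itself an int or None). All loop indices row/number lie in [1, size), hence nonnegative
-- and in range, so List.set / List.getD on .toNat are exact for Python's raster[...] there.
def padenVierkant (size : Int) (startingNumber : Option (Option Int)) : List (List (Option Int)) :=
  let start : Option Int := match startingNumber with
    | some pv => pv
    | none => some 1
  let raster := (PySem.List.pyRange 0 size).map
    (fun _ => (PySem.List.pyRange 0 size).map (fun _ => start))
  (PySem.List.pyRange 1 size).foldl (fun r row =>
    (PySem.List.pyRange 1 size).foldl (fun r number =>
      r.set row.toNat ((r.getD row.toNat []).set number.toNat
        (padenAddO ((r.getD (row - 1).toNat []).getD number.toNat none)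
                   ((r.getD row.toNat []).getD (number - 1).toNat none)))) r) raster

-- the 'while len(new_item) < max_string_size: new_item = " " + new_item' loop
def padenPadLoop (w : Nat) (s : List Char) : List Char :=
  if s.length < w then padenPadLoop w (' ' :: s) else s
termination_by w - s.length
decreasing_by simp; omega

def paden (size : Int) (start : Option Int) : String :=
  -- 'if start:' — the argument tuple is (start[0],), truthy even when start[0] is None,
  -- so both cases below take the if-branch and pass start[0] through to vierkant
  let raster := match start with
    | some v => padenVierkant size (some (some v))
    | none => padenVierkant size (some none)
  -- raster[size-1][size-1]: Python indexing; under Pre_paden (1 ≤ size) the index is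
  -- in range, so pyGet? is exact and the `.getD` defaults are never used.
  let corner : Option Int :=
    (PySem.List.pyGet? ((PySem.List.pyGet? raster (size - 1)).getD []) (size - 1)).getD none
  let maxStringSize : Nat := (padenStr corner).length + 1
  -- row/column run over [0, size): nonnegative and in range, getD on .toNat is exact
  let result := (PySem.List.pyRange 0 size).foldl (fun res row =>
    ((PySem.List.pyRange 0 size).foldl (fun res column =>
      res ++ padenPadLoop maxStringSize
        (padenStr ((raster.getD row.toNat []).getD column.toNat none))) res)
    ++ ['\n']) []
  String.ofList result

-- ===== PORT B =====
-- comb(n, k): r = r * (n - t) // (t + 1) for t in range(k)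
def padenComb (n k : Int) : Int :=
  (PySem.List.pyRange 0 k).foldl (fun r t => PySem.Int.floordiv (r * (n - t)) (t + 1)) 1

-- str.rjust(w): left-pad with spaces to width w
def padenRjust (s : List Char) (w : Nat) : List Char :=
  List.replicate (w - s.length) ' ' ++ s

def paden_alt (size : Int) (start : Option Int) : String :=
  -- 'start[0] if start and start[0] is not None else 1'
  let s := start.getD 1
  let width : Nat :=
    (PySem.Int.toChars (s * padenComb (2 * size - 2) (size - 1))).length + 1
  let lines := (PySem.List.pyRange 0 size).map (fun i =>
    PySem.Chars.join [] ((PySem.List.pyRange 0 size).map (fun j =>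
      padenRjust (PySem.Int.toChars (s * padenComb (i + j) i)) width)))
  String.ofList (PySem.Chars.join [] (lines.map (· ++ ['\n'])))

-- ===== PRECONDITION & SPEC =====
-- Pre_paden excludes size ≤ 0, where A raises IndexError at raster[size-1][size-1], and an
-- explicitly passed start = None together with size ≥ 2, where A raises TypeError on
-- None + None; the one remaining None input (size = 1) is where A returns, kept inside
-- Pre_ and declared as the intended difference D_paden below.
def Pre_paden (size : Int) (start : Option Int) : Prop :=
  1 ≤ size ∧ (start = none → size = 1)
instance (size : Int) (start : Option Int) : Decidable (Pre_paden size start) := by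
  unfold Pre_paden; infer_instance
def pvWitness_paden : Int × Option Int := (3, some 2)

-- When start is an explicitly passed None, A fills the grid with None and (on size = 1, the
-- only size where it then returns) prints ' None\n'; B treats None as the absent-argument
-- default 1 and returns ' 1\n', the intended value for an optional numeric start.
def D_paden (size : Int) (start : Option Int) : Prop := start = none
instance (size : Int) (start : Option Int) : Decidable (D_paden size start) := by
  unfold D_paden; infer_instance

def Spec_paden (size : Int) (start : Option Int) (out : String) : Prop :=
  ¬ D_paden size start → out = paden_alt size start
instance (size : Int) (start : Option Int) (out : String) : Decidable (Spec_paden size start out) := by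
  unfold Spec_paden; infer_instance

def pvDiffWitness_paden : Int × Option Int := (1, none)
def pvDiffWitnessOut_paden : String × String := (" None\n", " 1\n")

-- ===== CLAIM (what is proved, stated in full; the proofs are below) =====
def Claim_unchanged_paden : Prop := ∀ (size : Int) (start : Option Int),
  Dom_paden size start → Pre_paden size start → Spec_paden size start (paden size start)
def Claim_changed_paden : Prop :=
  Dom_paden (pvDiffWitness_paden.1) (pvDiffWitness_paden.2) ∧
  Pre_paden (pvDiffWitness_paden.1) (pvDiffWitness_paden.2) ∧
  D_paden (pvDiffWitness_paden.1) (pvDiffWitness_paden.2) ∧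
  paden (pvDiffWitness_paden.1) (pvDiffWitness_paden.2) = pvDiffWitnessOut_paden.1 ∧
  paden_alt (pvDiffWitness_paden.1) (pvDiffWitness_paden.2) = pvDiffWitnessOut_paden.2 ∧
  pvDiffWitnessOut_paden.1 ≠ pvDiffWitnessOut_paden.2
def Claim_exact_paden : Prop := ∀ (size : Int) (start : Option Int),
  Dom_paden size start → Pre_paden size start → D_paden size start →
  paden size start ≠ paden_alt size start

-- ===== LEMMAS AND PROOFS =====

-- the intended value of cell (i, j)
def padenTgt (s : Int) (i j : Nat) : Int := s * ((i + j).choose i : Nat)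

-- the same on an int-or-None start: None cells stay None
def padenTgtO (s : Option Int) (i j : Nat) : Option Int := s.map (fun v => padenTgt v i j)

-- an N×N grid given by a function on indices
def padenMapGrid {α : Type} (N : Nat) (f : Nat → Nat → α) : List (List α) :=
  (List.range N).map (fun i => (List.range N).map (f i))

-- one DP update step of A's grid, Nat-indexed
def padenUpd (g : List (List (Option Int))) (i j : Nat) : List (List (Option Int)) :=
  g.set i ((g.getD i []).set j
    (padenAddO ((g.getD (i - 1) []).getD j none) ((g.getD i []).getD (j - 1) none)))

-- the grid after the first r rows have been fully processed
def padenFRow (s : Option Int) (r : Nat) : Nat → Nat → Option Int :=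
  fun i j => if i ≤ r then padenTgtO s i j else s

theorem padenMapGrid_congr {α : Type} {N : Nat} {f g : Nat → Nat → α}
    (h : ∀ i j, i < N → j < N → f i j = g i j) : padenMapGrid N f = padenMapGrid N g := by
  unfold padenMapGrid
  refine List.map_congr_left (fun i hi => List.map_congr_left (fun j hj => ?_))
  exact h i j (List.mem_range.mp hi) (List.mem_range.mp hj)

theorem padenMapGrid_getD {α : Type} {N : Nat} {f : Nat → Nat → α} {i j : Nat} {d : α}
    (hi : i < N) (hj : j < N) :
    ((padenMapGrid N f).getD i []).getD j d = f i j := by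
  unfold padenMapGrid
  simp [List.getD_eq_getElem?_getD, hi, hj]

theorem padenMapGrid_set {α : Type} {N : Nat} {f : Nat → Nat → α} {i j : Nat} {v : α}
    (hi : i < N) (hj : j < N) :
    (padenMapGrid N f).set i (((padenMapGrid N f).getD i []).set j v)
      = padenMapGrid N (fun i' j' => if i' = i ∧ j' = j then v else f i' j') := by
  unfold padenMapGrid
  refine List.ext_getElem (by simp) ?_
  intro a h1 h2
  simp only [List.length_set, List.length_map, List.length_range] at h1
  rcases eq_or_ne a i with rfl | ha
  · simp [List.getD_eq_getElem?_getD, hi]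
    refine List.ext_getElem (by simp) ?_
    intro b h3 h4
    simp only [List.length_set, List.length_map, List.length_range] at h3
    rcases eq_or_ne b j with rfl | hb
    · simp
    · simp [List.getElem_set_ne (h := Ne.symm hb), hb]
  · simp [List.getElem_set_ne (h := Ne.symm ha), ha]

theorem padenTgt_pascal (s : Int) (r c : Nat) :
    padenTgt s r (c + 1) + padenTgt s (r + 1) c = padenTgt s (r + 1) (c + 1) := by
  unfold padenTgt
  have h : (r + 1 + (c + 1)).choose (r + 1) = (r + (c + 1)).choose r + (r + 1 + c).choose (r + 1) := by
    have h2 := Nat.choose_succ_succ (r + c + 1) r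
    have e1 : r + 1 + (c + 1) = (r + c + 1) + 1 := by omega
    have e2 : r + (c + 1) = r + c + 1 := by omega
    have e3 : r + 1 + c = r + c + 1 := by omega
    rw [e1, e2, e3, h2]
  rw [h]
  push_cast
  ring

theorem padenTgtO_pascal (s : Option Int) (r c : Nat) :
    padenAddO (padenTgtO s r (c + 1)) (padenTgtO s (r + 1) c) = padenTgtO s (r + 1) (c + 1) := by
  cases s with
  | none => rfl
  | some v => simp [padenTgtO, padenAddO, padenTgt_pascal]

theorem padenPyRange_one (m : Nat) :
    PySem.List.pyRange 1 ((m + 1 : Nat) : Int) = (List.range m).map (fun t => ((t + 1 : Nat) : Int)) := by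
  induction m with
  | zero => rfl
  | succ m ih =>
    have h : ((m + 1 + 1 : Nat) : Int) = ((m + 1 : Nat) : Int) + 1 := by push_cast; ring
    rw [h, PySem.List.pyRange_one_succ_right (by push_cast; omega), ih, List.range_succ]
    simp

-- the padding while-loop is exactly rjust
theorem padenPadLoop_eq (w : Nat) (s : List Char) :
    padenPadLoop w s = List.replicate (w - s.length) ' ' ++ s := by
  by_cases h : s.length < w
  · rw [padenPadLoop, if_pos h, padenPadLoop_eq w (' ' :: s)]
    have e : w - s.length = (w - (' ' :: s).length) + 1 := by simp; omega
    rw [e, List.replicate_succ']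
    simp
  · rw [padenPadLoop, if_neg h]
    have h0 : w - s.length = 0 := by omega
    simp [h0]
termination_by w - s.length
decreasing_by simp; omega

-- ''.join is flatten
theorem padenJoinNil (l : List (List Char)) : PySem.Chars.join [] l = l.flatten := by
  induction l with
  | nil => rfl
  | cons x xs ih =>
    cases xs with
    | nil => simp [PySem.Chars.join, List.intercalate]
    | cons y ys =>
      have h : List.intersperse ([] : List Char) (x :: y :: ys)
          = x :: [] :: List.intersperse [] (y :: ys) := by simp [List.intersperse]
      simp only [PySem.Chars.join, List.intercalate, h, List.flatten_cons, List.nil_append] at *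
      simp [ih]

-- B's comb loop computes the binomial coefficient
theorem padenComb_eq (n k : Nat) :
    padenComb (n : Int) (k : Int) = ((n.choose k : Nat) : Int) := by
  unfold padenComb
  rw [PySem.List.pyRange_zero_natCast, List.foldl_map]
  induction k with
  | zero => simp
  | succ k ih =>
    rw [List.range_succ, List.foldl_append, ih]
    simp only [List.foldl_cons, List.foldl_nil]
    by_cases hk : k ≤ n
    · have e1 : (n : Int) - (k : Nat) = ((n - k : Nat) : Int) := by
        push_cast [Nat.cast_sub hk]; ring
      have e2 : ((k : Nat) : Int) + 1 = ((k + 1 : Nat) : Int) := by push_cast; ring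
      rw [e1, e2, ← Nat.cast_mul, PySem.Int.floordiv_natCast]
      have h3 : n.choose k * (n - k) = n.choose (k + 1) * (k + 1) :=
        (Nat.choose_succ_right_eq n k).symm
      rw [h3, Nat.mul_div_cancel _ (Nat.succ_pos k)]
    · have h0 : n.choose k = 0 := Nat.choose_eq_zero_of_lt (by omega)
      have h1 : n.choose (k + 1) = 0 := Nat.choose_eq_zero_of_lt (by omega)
      rw [h0, h1]
      have e2 : ((k : Nat) : Int) + 1 = ((k + 1 : Nat) : Int) := by push_cast; ring
      rw [e2]
      push_cast
      rw [zero_mul]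
      have h4 := PySem.Int.floordiv_natCast 0 (k + 1)
      simpa using h4

-- loop invariant of A's inner (column) loop on row r+1
theorem padenInner_eq (s : Option Int) (N r : Nat) (hr : r + 1 < N) (m : Nat) (hm : m < N) :
    (List.range m).foldl (fun g c => padenUpd g (r + 1) (c + 1)) (padenMapGrid N (padenFRow s r))
      = padenMapGrid N (fun i j => if i ≤ r ∨ (i = r + 1 ∧ j ≤ m) then padenTgtO s i j else s) := by
  induction m with
  | zero =>
    simp only [List.range_zero, List.foldl_nil]
    refine padenMapGrid_congr (fun i j hi hj => ?_)
    unfold padenFRow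
    split_ifs with h1 h2
    · rfl
    · omega
    · have h3 : i = r + 1 ∧ j = 0 := by omega
      cases s with
      | none => rfl
      | some v => simp [h3.1, h3.2, padenTgtO, padenTgt, Nat.choose_self]
    · rfl
  | succ m ih =>
    rw [List.range_succ, List.foldl_append, ih (by omega)]
    simp only [List.foldl_cons, List.foldl_nil]
    unfold padenUpd
    rw [show r + 1 - 1 = r from rfl, show m + 1 - 1 = m from rfl]
    rw [padenMapGrid_getD (show r < N by omega) hm,
        padenMapGrid_getD hr (show m < N by omega)]
    rw [if_pos (by omega), if_pos (by omega), padenTgtO_pascal]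
    rw [padenMapGrid_set hr hm]
    refine padenMapGrid_congr (fun i j hi hj => ?_)
    split_ifs with h1 h2 h3 <;> first
      | rfl
      | omega
      | (rcases h1 with ⟨rfl, rfl⟩; rfl)

-- loop invariant of A's outer (row) loop
theorem padenOuter_eq (s : Option Int) (M : Nat) (m : Nat) (hm : m ≤ M) :
    (List.range m).foldl
        (fun g r => (List.range M).foldl (fun g c => padenUpd g (r + 1) (c + 1)) g)
        (padenMapGrid (M + 1) (padenFRow s 0))
      = padenMapGrid (M + 1) (padenFRow s m) := by
  induction m with
  | zero => simp
  | succ m ih =>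
    rw [List.range_succ, List.foldl_append, ih (by omega)]
    simp only [List.foldl_cons, List.foldl_nil]
    rw [padenInner_eq s (M + 1) m (by omega) M (by omega)]
    refine padenMapGrid_congr (fun i j hi hj => ?_)
    unfold padenFRow
    split_ifs <;> first | rfl | omega

-- A's DP grid equals the closed form
theorem padenVierkant_eq (size : Int) (pv : Option Int) (h : 0 ≤ size) :
    padenVierkant size (some pv) = padenMapGrid size.toNat (padenTgtO pv) := by
  obtain ⟨N, rfl⟩ : ∃ N : Nat, size = (N : Int) := ⟨size.toNat, (Int.toNat_of_nonneg h).symm⟩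
  unfold padenVierkant
  simp only [Int.toNat_natCast]
  have hinit : (PySem.List.pyRange 0 (N : Int)).map
      (fun _ => (PySem.List.pyRange 0 (N : Int)).map (fun _ => pv)) = padenMapGrid N (fun _ _ => pv) := by
    rw [PySem.List.pyRange_zero_natCast]
    unfold padenMapGrid
    rw [List.map_map, List.map_map]
    rfl
  rw [hinit]
  cases N with
  | zero =>
    show (PySem.List.pyRange 1 0).foldl _ _ = _
    rfl
  | succ M =>
    rw [padenPyRange_one, List.foldl_map]
    have hbody : ∀ (g : List (List (Option Int))) (r : Nat),
        ((List.range M).map (fun t => ((t + 1 : Nat) : Int))).foldl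
          (fun g number =>
            g.set ((r + 1 : Nat) : Int).toNat ((g.getD ((r + 1 : Nat) : Int).toNat []).set number.toNat
              (padenAddO ((g.getD (((r + 1 : Nat) : Int) - 1).toNat []).getD number.toNat none)
                         ((g.getD ((r + 1 : Nat) : Int).toNat []).getD (number - 1).toNat none)))) g
        = (List.range M).foldl (fun g c => padenUpd g (r + 1) (c + 1)) g := by
      intro g r
      rw [List.foldl_map]
      apply PySem.List.foldl_congr_mem
      intro acc c _
      unfold padenUpd
      have e1 : (((r + 1 : Nat) : Int)).toNat = r + 1 := Int.toNat_natCast _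
      have e2 : (((r + 1 : Nat) : Int) - 1).toNat = r := by
        have e : ((r + 1 : Nat) : Int) - 1 = ((r : Nat) : Int) := by push_cast; ring
        rw [e, Int.toNat_natCast]
      have e3 : (((c + 1 : Nat) : Int)).toNat = c + 1 := Int.toNat_natCast _
      have e4 : (((c + 1 : Nat) : Int) - 1).toNat = c := by
        have e : ((c + 1 : Nat) : Int) - 1 = ((c : Nat) : Int) := by push_cast; ring
        rw [e, Int.toNat_natCast]
      rw [e1, e2, e3, e4]
      simp
    have hinit2 : padenMapGrid (M + 1) (fun _ _ => pv) = padenMapGrid (M + 1) (padenFRow pv 0) := by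
      refine padenMapGrid_congr (fun i j hi hj => ?_)
      unfold padenFRow
      split_ifs with h1
      · interval_cases i
        cases pv with
        | none => rfl
        | some v => simp [padenTgtO, padenTgt]
      · rfl
    rw [hinit2]
    simp only [hbody]
    rw [padenOuter_eq pv M M le_rfl]
    refine padenMapGrid_congr (fun i j hi hj => ?_)
    unfold padenFRow
    rw [if_pos (by omega)]

-- reading the bottom-right corner of the grid
theorem padenCorner {α : Type} (N : Nat) (hN : 1 ≤ N) (f : Nat → Nat → α) (d : α) :
    (PySem.List.pyGet? ((PySem.List.pyGet? (padenMapGrid N f) ((N : Int) - 1)).getD [])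
      ((N : Int) - 1)).getD d = f (N - 1) (N - 1) := by
  have h1 : ((N : Int) - 1) = ((N - 1 : Nat) : Int) := by omega
  rw [h1, PySem.List.pyGet?_natCast]
  unfold padenMapGrid
  have hlt : N - 1 < N := by omega
  simp [hlt]

theorem paden_main (size : Int) (v : Int) (hpre : 1 ≤ size) :
    paden size (some v) = paden_alt size (some v) := by
  obtain ⟨N, rfl⟩ : ∃ N : Nat, size = (N : Int) :=
    ⟨size.toNat, (Int.toNat_of_nonneg (by omega)).symm⟩
  have hN : 1 ≤ N := by exact_mod_cast hpre
  have hmatch : padenVierkant (N : Int) (some (some v)) = padenMapGrid N (padenTgtO (some v)) := by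
    rw [padenVierkant_eq _ _ (by omega)]
    simp
  simp only [paden, paden_alt, hmatch]
  rw [padenCorner N hN]
  -- the two padding widths agree
  have hw : (PySem.Int.toChars ((some v).getD 1 * padenComb (2 * (N : Int) - 2) ((N : Int) - 1))).length + 1
      = (padenStr (padenTgtO (some v) (N - 1) (N - 1))).length + 1 := by
    have e1 : (2 * (N : Int) - 2) = ((2 * N - 2 : Nat) : Int) := by omega
    have e2 : ((N : Int) - 1) = ((N - 1 : Nat) : Int) := by omega
    have e3 : (N - 1) + (N - 1) = 2 * N - 2 := by omega
    rw [e1, e2, padenComb_eq]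
    unfold padenTgtO padenTgt padenStr
    simp only [Option.map_some, Option.getD_some]
    rw [e3]
  rw [← hw]
  apply congrArg
  -- normalise both loop nests to List.flatten of List.map over List.range N
  rw [PySem.List.pyRange_zero_natCast]
  simp only [List.foldl_map, Int.toNat_natCast, PySem.List.foldl_append_eq_flatMap,
    List.append_assoc, List.nil_append, padenJoinNil, List.map_map, List.flatMap_def]
  apply congrArg
  refine List.map_congr_left (fun i hi => ?_)
  have hiN : i < N := List.mem_range.mp hi
  apply congrArg (· ++ ['\n'])
  apply congrArg
  refine List.map_congr_left (fun j hj => ?_)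
  have hjN : j < N := List.mem_range.mp hj
  rw [padenMapGrid_getD hiN hjN]
  have e4 : ((i : Int) + (j : Int)) = ((i + j : Nat) : Int) := by push_cast; ring
  simp only [Function.comp_apply]
  rw [e4, padenComb_eq, padenPadLoop_eq]
  unfold padenRjust padenTgtO padenTgt padenStr
  simp only [Option.map_some, Option.getD_some]

-- ===== VERDICT (by name: the statements are the Claim_ definitions above) =====
theorem paden_spec : Claim_unchanged_paden := by
  intro size start _ hpre
  unfold Spec_paden
  intro hd
  unfold D_paden at hd
  cases start with
  | none => exact absurd rfl hd
  | some v => exact paden_main size v hpre.1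

theorem paden_changed : Claim_changed_paden := by
  unfold Claim_changed_paden
  refine ⟨by decide, by decide, by decide, ?_, ?_, by decide⟩
  · show paden 1 none = " None\n"
    simp only [paden, padenPadLoop_eq]; rfl
  · show paden_alt 1 none = " 1\n"
    rfl

theorem paden_tight : Claim_exact_paden := by
  intro size start _ hpre hd
  unfold D_paden at hd
  subst hd
  have h1 : size = 1 := hpre.2 rfl
  subst h1
  have ha : paden 1 none = " None\n" := by
    simp only [paden, padenPadLoop_eq]; rfl
  have hb : paden_alt 1 none = " 1\n" := rfl
  rw [ha, hb]
  decide
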